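-- pv_equiv track=rewrite | github.com/BenWiederhake/aoc2023 | 2024/day10/solve.py | find_next_sources
-- ===== SOURCE A (Python) =====
-- from collections import defaultdict
--
-- ORTHOGONAL_NEIGHBORS = [
--     (1, 0),
--     (0, 1),
--     (-1, 0),
--     (0, -1),
-- ]
--
-- def find_next_sources(current_sources, level_map, next_level_str):
--     sources = defaultdict(set)
--     w, h = len(level_map[0]), len(level_map)
--     for (col_no, row_no), cell_sources in current_sources.items():
--         for dx, dy in ORTHOGONAL_NEIGHBORS:
--             n_col_no, n_row_no = col_no + dx, row_no + dy
--             if not (0 <= n_col_no < w and 0 <= n_row_no < h):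
--                 # Can't continue a trail outside the map
--                 continue
--             n_char = level_map[n_row_no][n_col_no]
--             if n_char != next_level_str:
--                 # Wrong height
--                 continue
--             # Works!
--             sources[(n_col_no, n_row_no)].update(cell_sources)
--     return sources
-- ===== SOURCE B (Python) =====
-- from collections import defaultdict
--
-- ORTHOGONAL_NEIGHBORS = [
--     (1, 0),
--     (0, 1),
--     (-1, 0),
--     (0, -1),
-- ]
--
-- def find_next_sources(current_sources, level_map, next_level_str):
--     # Pull instead of push: first gather the target cells, then, for each target,
--     # collect the sources of every orthogonally adjacent current source.
--     w, h = len(level_map[0]), len(level_map)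
--
--     def targets(c, r):
--         out = []
--         for dx, dy in ORTHOGONAL_NEIGHBORS:
--             nc, nr = c + dx, r + dy
--             if (0 <= nc < w and 0 <= nr < h) and level_map[nr][nc] == next_level_str:
--                 out.append((nc, nr))
--         return out
--
--     keys = dict.fromkeys(t for (c, r) in current_sources for t in targets(c, r))
--     result = defaultdict(set)
--     for (kc, kr) in keys:
--         merged = set()
--         for (c, r), srcs in current_sources.items():
--             if abs(kc - c) + abs(kr - r) == 1:
--                 merged.update(srcs)
--         result[(kc, kr)] = merged
--     return result
-- ===== Notes on version B (the rewrite author's own statement) =====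
-- stated objective: alternative
-- what changed: Inverts the propagation from push to pull: instead of mutating a defaultdict while looping over sources and directions, B first gathers the ordered list of target cells and then, for each target, merges the sources of every orthogonally adjacent current source via a Manhattan-distance test.
import Mathlib
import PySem

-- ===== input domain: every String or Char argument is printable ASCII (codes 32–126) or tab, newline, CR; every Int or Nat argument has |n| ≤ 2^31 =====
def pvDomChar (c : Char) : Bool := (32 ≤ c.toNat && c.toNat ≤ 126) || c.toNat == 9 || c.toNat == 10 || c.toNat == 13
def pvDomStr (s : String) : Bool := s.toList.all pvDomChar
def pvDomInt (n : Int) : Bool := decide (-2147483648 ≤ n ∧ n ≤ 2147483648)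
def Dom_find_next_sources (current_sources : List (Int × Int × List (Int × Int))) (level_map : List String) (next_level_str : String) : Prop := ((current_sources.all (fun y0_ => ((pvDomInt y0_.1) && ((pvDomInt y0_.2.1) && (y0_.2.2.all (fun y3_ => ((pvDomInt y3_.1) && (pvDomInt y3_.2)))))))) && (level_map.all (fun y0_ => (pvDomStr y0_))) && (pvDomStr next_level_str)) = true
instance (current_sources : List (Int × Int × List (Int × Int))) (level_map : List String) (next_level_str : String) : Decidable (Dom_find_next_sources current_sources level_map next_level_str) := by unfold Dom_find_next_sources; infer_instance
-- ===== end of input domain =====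

-- B inverts A's push over sources×directions into a gather of target cells followed by a pull
-- over adjacent sources (objective: alternative decomposition, same result).

-- ===== PORT A =====
-- ORTHOGONAL_NEIGHBORS (module constant, shared by both Pythons)
def pvOrtho : List (Int × Int) := [(1, 0), (0, 1), (-1, 0), (0, -1)]

-- level_map[nr][nc] as a 1-character string (both Pythons write this expression);
-- the .getD defaults are only reached outside Pre_find_next_sources (where Python raises).
def pvCharAt (level_map : List String) (nr nc : Int) : String :=
  ((PySem.Str.pyGet? (PySem.List.pyGetD level_map nr "") nc).map (fun ch => String.mk [ch])).getD ""

-- sources[(kc, kr)].update(xs) on a defaultdict(set) represented as an association list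
def pvDictUpd (d : List (Int × Int × List (Int × Int))) (kc kr : Int) (xs : List (Int × Int)) :
    List (Int × Int × List (Int × Int)) :=
  match d with
  | [] => [(kc, kr, PySem.Set.update PySem.Set.empty xs)]
  | (c, r, s) :: t =>
    if c = kc ∧ r = kr then (c, r, PySem.Set.update s xs) :: t
    else (c, r, s) :: pvDictUpd t kc kr xs

def find_next_sources (current_sources : List (Int × Int × List (Int × Int))) (level_map : List String) (next_level_str : String) : List (Int × Int × List (Int × Int)) :=
  let w : Int := (PySem.Str.len (PySem.List.pyGetD level_map 0 "") : Int)
  let h : Int := (level_map.length : Int)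
  current_sources.foldl (fun d e =>
    pvOrtho.foldl (fun d dd =>
      let nc := e.1 + dd.1
      let nr := e.2.1 + dd.2
      if 0 ≤ nc ∧ nc < w ∧ 0 ≤ nr ∧ nr < h then
        if pvCharAt level_map nr nc ≠ next_level_str then d
        else pvDictUpd d nc nr e.2.2
      else d) d) []

-- ===== PORT B =====
-- helper targets(c, r) of Source B: the in-bounds neighbors of (c, r) carrying next_level_str
def pvTargets (level_map : List String) (next_level_str : String) (w h c r : Int) : List (Int × Int) :=
  pvOrtho.foldl (fun out dd =>
    let nc := c + dd.1
    let nr := r + dd.2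
    if (0 ≤ nc ∧ nc < w ∧ 0 ≤ nr ∧ nr < h) ∧ pvCharAt level_map nr nc = next_level_str
    then out ++ [(nc, nr)] else out) []

def find_next_sources_alt (current_sources : List (Int × Int × List (Int × Int))) (level_map : List String) (next_level_str : String) : List (Int × Int × List (Int × Int)) :=
  let w : Int := (PySem.Str.len (PySem.List.pyGetD level_map 0 "") : Int)
  let h : Int := (level_map.length : Int)
  let keys := PySem.Set.ofList (current_sources.flatMap (fun e => pvTargets level_map next_level_str w h e.1 e.2.1))
  keys.map (fun k =>
    (k.1, k.2,
      current_sources.foldl (fun merged e =>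
        if (k.1 - e.1).natAbs + (k.2 - e.2.1).natAbs = 1
        then PySem.Set.update merged e.2.2 else merged) PySem.Set.empty))

-- ===== PRECONDITION & SPEC =====
-- Pre_ excludes exactly the inputs where Python A raises an IndexError: an empty level_map
-- (len(level_map[0])), or a reached neighbor cell whose (ragged) row is too short.
def Pre_find_next_sources (current_sources : List (Int × Int × List (Int × Int))) (level_map : List String) (next_level_str : String) : Prop :=
  level_map ≠ [] ∧
  ∀ e ∈ current_sources, ∀ dd ∈ ([(1, 0), (0, 1), (-1, 0), (0, -1)] : List (Int × Int)),
    (0 ≤ e.1 + dd.1 ∧ e.1 + dd.1 < (PySem.Str.len (PySem.List.pyGetD level_map 0 "") : Int) ∧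
     0 ≤ e.2.1 + dd.2 ∧ e.2.1 + dd.2 < (level_map.length : Int)) →
    e.1 + dd.1 < (PySem.Str.len (PySem.List.pyGetD level_map (e.2.1 + dd.2) "") : Int)
instance (current_sources : List (Int × Int × List (Int × Int))) (level_map : List String) (next_level_str : String) : Decidable (Pre_find_next_sources current_sources level_map next_level_str) := by unfold Pre_find_next_sources; infer_instance

def pvWitness_find_next_sources : (List (Int × Int × List (Int × Int))) × List String × String :=
  ([(0, 0, [(0, 0)])], ["ab", "cd"], "b")

def Spec_find_next_sources (current_sources : List (Int × Int × List (Int × Int))) (level_map : List String) (next_level_str : String) (out : List (Int × Int × List (Int × Int))) : Prop := out = find_next_sources_alt current_sources level_map next_level_str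
instance (current_sources : List (Int × Int × List (Int × Int))) (level_map : List String) (next_level_str : String) (out : List (Int × Int × List (Int × Int))) : Decidable (Spec_find_next_sources current_sources level_map next_level_str out) := by unfold Spec_find_next_sources; infer_instance

-- ===== CLAIM (what is proved, stated in full; the proofs are below) =====
def Claim_equal_find_next_sources : Prop := ∀ (current_sources : List (Int × Int × List (Int × Int))) (level_map : List String) (next_level_str : String), Dom_find_next_sources current_sources level_map next_level_str → Pre_find_next_sources current_sources level_map next_level_str → Spec_find_next_sources current_sources level_map next_level_str (find_next_sources current_sources level_map next_level_str)

-- ===== LEMMAS AND PROOFS =====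

-- the filtered targets of (c, r), as a flatMap over an arbitrary direction list
def pvFT (level_map : List String) (next_level_str : String) (w h c r : Int) (ds : List (Int × Int)) : List (Int × Int) :=
  ds.flatMap (fun dd =>
    if (0 ≤ c + dd.1 ∧ c + dd.1 < w ∧ 0 ≤ r + dd.2 ∧ r + dd.2 < h) ∧
       pvCharAt level_map (r + dd.2) (c + dd.1) = next_level_str
    then [(c + dd.1, r + dd.2)] else [])

theorem foldl_filtered_append {α β : Type} (C : α → Prop) [DecidablePred C] (t : α → β)
    (ds : List α) (acc : List β) :
    ds.foldl (fun out dd => if C dd then out ++ [t dd] else out) acc =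
      acc ++ ds.flatMap (fun dd => if C dd then [t dd] else []) := by
  induction ds generalizing acc with
  | nil => simp
  | cons d ds ih => by_cases h : C d <;> simp [h, ih]

theorem pvTargets_eq_pvFT (lm : List String) (nl : String) (w h c r : Int) :
    pvTargets lm nl w h c r = pvFT lm nl w h c r pvOrtho := by
  unfold pvTargets pvFT
  exact (foldl_filtered_append _ _ pvOrtho []).trans (by simp)

theorem pvInnerA_eq (lm : List String) (nl : String) (w h : Int)
    (ds : List (Int × Int)) (d : List (Int × Int × List (Int × Int))) (c r : Int) (xs : List (Int × Int)) :
    ds.foldl (fun d dd =>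
      if 0 ≤ c + dd.1 ∧ c + dd.1 < w ∧ 0 ≤ r + dd.2 ∧ r + dd.2 < h then
        if pvCharAt lm (r + dd.2) (c + dd.1) ≠ nl then d
        else pvDictUpd d (c + dd.1) (r + dd.2) xs
      else d) d =
    (pvFT lm nl w h c r ds).foldl (fun d t => pvDictUpd d t.1 t.2 xs) d := by
  simp only [ite_not]
  induction ds generalizing d with
  | nil => simp [pvFT]
  | cons dd ds ih =>
    simp only [List.foldl_cons, pvFT, List.flatMap_cons]
    by_cases hb : 0 ≤ c + dd.1 ∧ c + dd.1 < w ∧ 0 ≤ r + dd.2 ∧ r + dd.2 < h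
    · by_cases hc : pvCharAt lm (r + dd.2) (c + dd.1) = nl
      · simp [hb, hc, ih, pvFT]
      · simp [hb, hc, ih, pvFT]
    · simp [hb, ih, pvFT]

theorem foldl_flatMap_foldl {α β γ : Type} (l : List α) (f : α → List β) (g : γ → β → γ) (init : γ) :
    l.foldl (fun acc a => (f a).foldl g acc) init = (l.flatMap f).foldl g init := by
  induction l generalizing init with
  | nil => simp
  | cons a l ih => simp [List.foldl_append, ih]

-- behaviour of one defaultdict update on the grouped form
theorem pvDictUpd_map (ks : List (Int × Int)) (hnd : ks.Nodup) (F : (Int × Int) → List (Int × Int))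
    (k : Int × Int) (xs : List (Int × Int)) :
    pvDictUpd (ks.map (fun q => (q.1, q.2, F q))) k.1 k.2 xs =
      if k ∈ ks then
        ks.map (fun q => (q.1, q.2, if q = k then PySem.Set.update (F q) xs else F q))
      else ks.map (fun q => (q.1, q.2, F q)) ++ [(k.1, k.2, PySem.Set.update PySem.Set.empty xs)] := by
  induction ks with
  | nil => simp [pvDictUpd]
  | cons q ks ih =>
    obtain ⟨hq, hksnd⟩ := List.nodup_cons.mp hnd
    simp only [List.map_cons, pvDictUpd]
    by_cases hqk : q = k
    · subst hqk
      rw [if_pos ⟨rfl, rfl⟩]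
      simp only [List.mem_cons, true_or, if_pos trivial]
      refine List.cons_eq_cons.mpr ⟨rfl, ?_⟩
      refine (List.map_congr_left (fun p hp => ?_)).symm
      have hpq : p ≠ q := fun h => hq (h ▸ hp)
      simp [hpq]
    · rw [if_neg (by simpa [Prod.ext_iff] using hqk)]
      rw [ih hksnd]
      by_cases hk : k ∈ ks
      · simp [hk, hqk]
      · have hkq : ¬ k = q := fun h => hqk h.symm
        simp [hk, hkq]

-- the main grouping lemma: folding pvDictUpd over an event list yields first-occurrence keys
-- with, per key, the fold of its contributions
theorem pvFold_events (ev : List ((Int × Int) × List (Int × Int))) :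
    ev.foldl (fun d p => pvDictUpd d p.1.1 p.1.2 p.2) [] =
      (PySem.Set.ofList (ev.map Prod.fst)).map (fun k =>
        (k.1, k.2, (ev.filter (fun p => p.1 = k)).foldl (fun s p => PySem.Set.update s p.2) PySem.Set.empty)) := by
  induction ev using List.reverseRecOn with
  | nil => simp [PySem.Set.ofList]
  | append_singleton ev p ih =>
    rw [List.foldl_append, List.foldl_cons, List.foldl_nil, ih,
        pvDictUpd_map _ (PySem.Set.nodup_ofList _) _ p.1 p.2]
    have hofl : PySem.Set.ofList ((ev ++ [p]).map Prod.fst) =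
        PySem.Set.add (PySem.Set.ofList (ev.map Prod.fst)) p.1 := by
      simp [PySem.Set.ofList_eq_foldl, List.foldl_append]
    by_cases hp : p.1 ∈ PySem.Set.ofList (ev.map Prod.fst)
    · rw [if_pos hp]
      have hadd : PySem.Set.add (PySem.Set.ofList (ev.map Prod.fst)) p.1 =
          PySem.Set.ofList (ev.map Prod.fst) := by
        simp [PySem.Set.add, PySem.Set.contains, hp]
      rw [hofl, hadd]
      refine List.map_congr_left (fun q hq => ?_)
      simp only [List.filter_append, List.foldl_append]
      by_cases hqp : q = p.1
      · subst hqp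
        simp
      · have : ¬ p.1 = q := fun h => hqp h.symm
        simp [this, hqp]
    · rw [if_neg hp]
      have hadd : PySem.Set.add (PySem.Set.ofList (ev.map Prod.fst)) p.1 =
          PySem.Set.ofList (ev.map Prod.fst) ++ [p.1] := by
        simp [PySem.Set.add, PySem.Set.contains, hp]
      rw [hofl, hadd, List.map_append]
      have hnot : p.1 ∉ ev.map Prod.fst := fun h => hp ((PySem.Set.mem_ofList _ _).mpr h)
      have hfe : ev.filter (fun q => q.1 = p.1) = [] := by
        rw [List.filter_eq_nil_iff]
        intro q hq hq1
        apply hnot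
        have : q.1 = p.1 := by simpa using hq1
        exact this ▸ List.mem_map_of_mem (f := Prod.fst) hq
      refine congrArg₂ _ ?_ ?_
      · refine List.map_congr_left (fun q hq => ?_)
        have hqp : ¬ q = p.1 := fun h => hnot (h ▸ (PySem.Set.mem_ofList _ _).mp hq)
        have : ¬ p.1 = q := fun h => hqp h.symm
        simp only [List.filter_append, List.foldl_append]
        simp [this]
      · simp [List.filter_append, hfe]

-- the event list of A: one entry per (source, accepted direction), in A's visit order
def pvEv (cs : List (Int × Int × List (Int × Int))) (lm : List String) (nl : String) (w h : Int) :
    List ((Int × Int) × List (Int × Int)) :=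
  cs.flatMap (fun e => (pvFT lm nl w h e.1 e.2.1 pvOrtho).map (fun t => (t, e.2.2)))

theorem A_events (cs : List (Int × Int × List (Int × Int))) (lm : List String) (nl : String) :
    find_next_sources cs lm nl =
      (pvEv cs lm nl (PySem.Str.len (PySem.List.pyGetD lm 0 "") : Int) (lm.length : Int)).foldl
        (fun d p => pvDictUpd d p.1.1 p.1.2 p.2) [] := by
  unfold find_next_sources pvEv
  rw [← foldl_flatMap_foldl]
  exact congrArg (fun f => List.foldl f ([] : List (Int × Int × List (Int × Int))) cs)
    (funext fun d => funext fun e =>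
      (pvInnerA_eq lm nl _ _ pvOrtho d e.1 e.2.1 e.2.2).trans
        (List.foldl_map (f := fun t : Int × Int => (t, e.2.2))
          (g := fun d p => pvDictUpd d p.1.1 p.1.2 p.2) (init := d)).symm)

theorem ev_keys (cs : List (Int × Int × List (Int × Int))) (lm : List String) (nl : String) (w h : Int) :
    (pvEv cs lm nl w h).map Prod.fst = cs.flatMap (fun e => pvFT lm nl w h e.1 e.2.1 pvOrtho) := by
  simp [pvEv, List.map_flatMap, List.map_map, Function.comp_def]

theorem filter_flatMap {α β : Type} (l : List α) (f : α → List β) (p : β → Bool) :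
    (l.flatMap f).filter p = l.flatMap (fun a => (f a).filter p) := by
  induction l with
  | nil => rfl
  | cons a l ih => simp [List.filter_append, ih]

theorem chunk_eq (k t : Int × Int) (xs : List (Int × Int)) (C : Prop) [Decidable C] (h : t = k → C) :
    ((if C then [t] else []).map (fun t => (t, xs))).filter (fun p => p.1 = k) =
      if t = k then [(k, xs)] else [] := by
  by_cases ht : t = k
  · subst ht; simp [h rfl]
  · by_cases hC : C <;> simp [hC, ht]

theorem filt_entry (lm : List String) (nl : String) (w h : Int) (k : Int × Int)
    (hb : 0 ≤ k.1 ∧ k.1 < w ∧ 0 ≤ k.2 ∧ k.2 < h) (hc : pvCharAt lm k.2 k.1 = nl)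
    (c r : Int) (xs : List (Int × Int)) :
    ((pvFT lm nl w h c r pvOrtho).map (fun t => (t, xs))).filter (fun p => p.1 = k) =
      if (k.1 - c).natAbs + (k.2 - r).natAbs = 1 then [(k, xs)] else [] := by
  have step : ∀ dc dr : Int,
      ((if (0 ≤ c + dc ∧ c + dc < w ∧ 0 ≤ r + dr ∧ r + dr < h) ∧
          pvCharAt lm (r + dr) (c + dc) = nl then [(c + dc, r + dr)] else []).map
        (fun t => (t, xs))).filter (fun p => p.1 = k) =
      if (c + dc, r + dr) = k then [(k, xs)] else [] := by
    intro dc dr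
    refine chunk_eq k _ xs _ (fun ht => ?_)
    obtain ⟨h1, h2⟩ := Prod.mk.injEq .. ▸ ht
    rw [h1, h2]
    exact ⟨hb, hc⟩
  simp only [pvFT, pvOrtho, List.flatMap_cons, List.flatMap_nil, List.append_nil,
    List.map_append, List.filter_append]
  rw [step, step, step, step]
  obtain ⟨kc, kr⟩ := k
  simp only [Prod.mk.injEq]
  split_ifs <;> first | (exfalso; omega) | simp

theorem foldl_flatMap_if {α β γ : Type} (l : List α) (C : α → Prop) [DecidablePred C]
    (v : α → β) (g : γ → β → γ) (init : γ) :
    (l.flatMap (fun a => if C a then [v a] else [])).foldl g init =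
      l.foldl (fun acc a => if C a then g acc (v a) else acc) init := by
  induction l generalizing init with
  | nil => rfl
  | cons a l ih => by_cases hC : C a <;> simp [hC, ih]

theorem mem_keys_cond (cs : List (Int × Int × List (Int × Int))) (lm : List String) (nl : String)
    (w h : Int) (k : Int × Int)
    (hk : k ∈ cs.flatMap (fun e => pvFT lm nl w h e.1 e.2.1 pvOrtho)) :
    (0 ≤ k.1 ∧ k.1 < w ∧ 0 ≤ k.2 ∧ k.2 < h) ∧ pvCharAt lm k.2 k.1 = nl := by
  rw [List.mem_flatMap] at hk
  obtain ⟨e, _, hke⟩ := hk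
  rw [pvFT, List.mem_flatMap] at hke
  obtain ⟨dd, _, hkd⟩ := hke
  by_cases hC : (0 ≤ e.1 + dd.1 ∧ e.1 + dd.1 < w ∧ 0 ≤ e.2.1 + dd.2 ∧ e.2.1 + dd.2 < h) ∧
      pvCharAt lm (e.2.1 + dd.2) (e.1 + dd.1) = nl
  · rw [if_pos hC, List.mem_singleton] at hkd
    subst hkd
    exact hC
  · rw [if_neg hC] at hkd
    exact absurd hkd (List.not_mem_nil)

-- ===== VERDICT (by name: the statement is the Claim_ definition above) =====
theorem find_next_sources_spec : Claim_equal_find_next_sources := by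
  intro cs lm nl _ _
  show find_next_sources cs lm nl = find_next_sources_alt cs lm nl
  rw [A_events, pvFold_events, ev_keys]
  unfold find_next_sources_alt
  simp only [pvTargets_eq_pvFT]
  refine List.map_congr_left (fun k hk => ?_)
  obtain ⟨hb, hc⟩ := mem_keys_cond cs lm nl _ _ k ((PySem.Set.mem_ofList _ _).mp hk)
  refine congrArg (fun v => (k.1, k.2, v)) ?_
  rw [pvEv, filter_flatMap]
  rw [show (fun (a : Int × Int × List (Int × Int)) =>
      ((pvFT lm nl (PySem.Str.len (PySem.List.pyGetD lm 0 "") : Int) (lm.length : Int) a.1 a.2.1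
          pvOrtho).map (fun t => (t, a.2.2))).filter (fun p => p.1 = k)) =
      (fun a : Int × Int × List (Int × Int) =>
        if (k.1 - a.1).natAbs + (k.2 - a.2.1).natAbs = 1 then [(k, a.2.2)] else []) from
    funext (fun a => filt_entry lm nl _ _ k hb hc a.1 a.2.1 a.2.2)]
  rw [foldl_flatMap_if]
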